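-- pv_equiv track=rewrite | github.com/luccacb16/neuralflip | features/F33.py | F33
-- ===== SOURCE A (Python) =====
-- def F33(seq: str) -> int:
--     '''
--     Feature 33: Complexidade de Permutação
--
--     Função que calcula a complexidade de permutação da sequência.
--
--     Args:
--         seq (str): sequência
--
--     Returns:
--         float: valor complexidade de permutação da sequência
--     '''
--
--     sorted_indices = sorted(range(len(seq)), key=lambda k: seq[k])
--
--     complexity = 0
--     visited = [False] * len(seq)
--
--     for i in range(len(seq)):
--         if visited[i] or sorted_indices[i] == i:
--             continue
--
--         j = i
--         while not visited[j]:
--             visited[j] = True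
--             j = sorted_indices[j]
--             complexity += 1
--
--     return complexity
-- ===== SOURCE B (Python) =====
-- def F33(seq: str) -> int:
--     '''
--     Feature 33: Complexidade de Permutação — same value as A.
--
--     The cycle walk in A visits exactly the elements of every non-trivial cycle
--     of the stable-sort permutation, adding 1 per visited element, so the
--     complexity is simply the number of indices the sort moves.
--     '''
--     sorted_indices = sorted(range(len(seq)), key=lambda k: seq[k])
--     return sum(1 for i, t in enumerate(sorted_indices) if t != i)
-- ===== Notes on version B (the rewrite author's own statement) =====
-- stated objective: simpler
-- what changed: B replaces A's visited-array cycle traversal (outer loop plus an inner while walk over each cycle) by a one-line count of indices the stable sort displaces, using the fact that the cycle walk adds exactly one per non-fixed point of the permutation.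
import Mathlib
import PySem

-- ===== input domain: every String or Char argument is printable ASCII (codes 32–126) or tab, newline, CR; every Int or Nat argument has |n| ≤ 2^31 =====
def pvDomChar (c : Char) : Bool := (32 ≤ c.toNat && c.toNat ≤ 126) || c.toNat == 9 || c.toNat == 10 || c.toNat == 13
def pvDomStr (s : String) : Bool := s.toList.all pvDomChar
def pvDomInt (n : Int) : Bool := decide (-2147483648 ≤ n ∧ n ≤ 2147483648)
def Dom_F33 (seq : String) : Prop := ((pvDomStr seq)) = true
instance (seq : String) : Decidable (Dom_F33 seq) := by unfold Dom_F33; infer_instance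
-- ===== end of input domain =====

-- B replaces A's visited-array cycle traversal by a direct count of the indices the stable
-- sort displaces (each non-trivial cycle of length L contributes exactly L to A's counter).


-- ===== PORT A =====
-- the 'while not visited[j]' walk; fuel = n+1 is a pure totality guard: each pass marks an
-- unvisited entry true, so at most n iterations ever happen
def F33innerA (p : List Int) : Nat → List Bool → Int → Int → List Bool × Int
  | 0, visited, _, c => (visited, c)
  | fuel+1, visited, j, c =>
    if PySem.List.pyGetD visited j false then (visited, c)
    else F33innerA p fuel (PySem.List.pySetD visited j true) (PySem.List.pyGetD p j 0) (c + 1)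

def F33 (seq : String) : Int :=
  let cs := seq.toList
  let n := cs.length
  -- sorted(range(len(seq)), key=lambda k: seq[k]); k is always in range, so the getD default is never read
  let sortedIndices := PySem.List.sorted (PySem.List.pyRange 0 (n : Int) 1) (fun k => PySem.List.pyGetD cs k ' ') false
  let res := (PySem.List.pyRange 0 (n : Int) 1).foldl
    (fun (st : List Bool × Int) i =>
      if PySem.List.pyGetD st.1 i false || decide (PySem.List.pyGetD sortedIndices i 0 = i) then st
      else F33innerA sortedIndices (n + 1) st.1 i st.2)
    (List.replicate n false, 0)
  res.2

-- ===== PORT B =====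
def F33_alt (seq : String) : Int :=
  let cs := seq.toList
  let sortedIndices := PySem.List.sorted (PySem.List.pyRange 0 (cs.length : Int) 1) (fun k => PySem.List.pyGetD cs k ' ') false
  (PySem.List.enumerate sortedIndices 0).foldl (fun acc pr => if pr.2 ≠ pr.1 then acc + 1 else acc) 0

-- ===== PRECONDITION & SPEC =====
def Spec_F33 (seq : String) (out : Int) : Prop := out = F33_alt seq
instance (seq : String) (out : Int) : Decidable (Spec_F33 seq out) := by unfold Spec_F33; infer_instance

-- ===== CLAIM (what is proved, stated in full; the proofs are below) =====
def Claim_equal_F33 : Prop := ∀ (seq : String), Dom_F33 seq → Spec_F33 seq (F33 seq)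

-- ===== LEMMAS AND PROOFS =====

-- A's outer for-loop, after re-indexing range(n) by Nat, stopped after m iterations
def F33loop (n : Nat) (p : List Int) (m : Nat) : List Bool × Int :=
  (List.range m).foldl
    (fun (st : List Bool × Int) (i : Nat) =>
      if PySem.List.pyGetD st.1 (i : Int) false || decide (PySem.List.pyGetD p (i : Int) 0 = (i : Int)) then st
      else F33innerA p (n + 1) st.1 (i : Int) st.2)
    (List.replicate n false, 0)

-- bridge: Python's xs[i] with 0 ≤ i < len as a Nat-indexed getD
theorem pyGetD_int_toNat {α : Type} (xs : List α) (i : Int) (d : α)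
    (h0 : 0 ≤ i) (h1 : i < (xs.length : Int)) :
    PySem.List.pyGetD xs i d = xs.getD i.toNat d := by
  rw [PySem.List.pyGetD_eq_getElem xs d h0 h1, List.getD_eq_getElem xs d (by omega)]

theorem getD_set_bool (V : List Bool) (k m : Nat) (hk : k < V.length) :
    (V.set k true).getD m false = if m = k then true else V.getD m false := by
  rcases eq_or_ne m k with rfl | h
  · simp [List.getD_eq_getElem?_getD, hk]
  · simp [List.getD_eq_getElem?_getD, h, Ne.symm h]

theorem count_set_true (V : List Bool) (k : Nat) (hk : k < V.length)
    (hf : V.getD k false = false) :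
    (V.set k true).count true = V.count true + 1 := by
  have hv : V[k] = false := by rwa [List.getD_eq_getElem V false hk] at hf
  have hV : V.take k ++ V[k] :: V.drop (k+1) = V := by
    rw [List.getElem_cons_drop, List.take_append_drop]
  rw [List.set_eq_take_append_cons_drop, if_pos hk]
  conv_rhs => rw [← hV]
  simp [List.count_append, hv]
  omega

theorem count_true_lt (V : List Bool) (k : Nat) (hk : k < V.length)
    (hf : V.getD k false = false) : V.count true < V.length := by
  have hv : V[k] = false := by rwa [List.getD_eq_getElem V false hk] at hf
  have hmem : false ∈ V := hv ▸ List.getElem_mem hk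
  have h1 : 0 < V.count false := List.count_pos_iff.mpr hmem
  have h2 : V.count true + V.count false = V.length := by
    rw [List.count_eq_countP, List.count_eq_countP,
      List.length_eq_countP_add_countP (fun x => x == true)]
    congr 1
    apply List.countP_congr; intro a _; cases a <;> simp
  omega

theorem count_true_eq_countP_range (V : List Bool) :
    (List.range V.length).countP (fun k => V.getD k false) = V.count true := by
  induction V with
  | nil => simp
  | cons x V ih =>
    rw [List.length_cons, List.range_succ_eq_map, List.countP_cons, List.countP_map]
    simp only [Function.comp_def, List.getD_cons_succ, List.getD_cons_zero, List.count_cons, ih]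
    cases x <;> simp

-- the inner while-loop: starting from an unvisited-or-closing j it marks every element of
-- the pending cycle, adding exactly one to the counter per newly marked element
theorem innerA_spec (n : Nat) (p : List Int)
    (hlen : p.length = n)
    (hmem : ∀ k, k < n → 0 ≤ p.getD k 0 ∧ p.getD k 0 < (n : Int))
    (hinj : ∀ a b, a < n → b < n → p.getD a 0 = p.getD b 0 → a = b) :
    ∀ (fuel : Nat) (V : List Bool) (j : Int) (c : Int),
    V.length = n →
    0 ≤ j → j < (n : Int) →
    c = (V.count true : Int) →
    (∀ k, k < n → V.getD k false = true → p.getD k 0 ≠ (k : Int)) →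
    (∀ k, k < n → V.getD k false = true →
        (V.getD (p.getD k 0).toNat false = true ∨ p.getD k 0 = j)) →
    (p.getD j.toNat 0 ≠ j ∨ V.getD j.toNat false = true) →
    n - V.count true < fuel →
    (F33innerA p fuel V j c).1.length = n ∧
    (F33innerA p fuel V j c).2 = ((F33innerA p fuel V j c).1.count true : Int) ∧
    (∀ k, k < n → V.getD k false = true → (F33innerA p fuel V j c).1.getD k false = true) ∧
    (F33innerA p fuel V j c).1.getD j.toNat false = true ∧
    (∀ k, k < n → (F33innerA p fuel V j c).1.getD k false = true → p.getD k 0 ≠ (k : Int)) ∧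
    (∀ k, k < n → (F33innerA p fuel V j c).1.getD k false = true →
        (F33innerA p fuel V j c).1.getD (p.getD k 0).toNat false = true) := by
  intro fuel
  induction fuel with
  | zero =>
    intro V j c hVlen hj0 hjn hc hNF hClos hE hfuel
    exact absurd hfuel (by omega)
  | succ fuel ih =>
    intro V j c hVlen hj0 hjn hc hNF hClos hE hfuel
    have hkj : j.toNat < n := by omega
    have hcast : ((j.toNat : Nat) : Int) = j := Int.toNat_of_nonneg hj0
    have hget : PySem.List.pyGetD V j false = V.getD j.toNat false :=
      pyGetD_int_toNat V j false hj0 (by omega)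
    by_cases hvj : V.getD j.toNat false = true
    · -- already visited: loop exits immediately
      have hres : F33innerA p (fuel+1) V j c = (V, c) := by
        simp only [F33innerA, hget, hvj, if_pos]
      rw [hres]
      refine ⟨hVlen, hc, fun k _ h => h, hvj, hNF, ?_⟩
      intro k hk hVk
      rcases hClos k hk hVk with h | h
      · exact h
      · rw [h, ← hcast] at *
        simpa [Int.toNat_natCast] using hvj
    · -- unvisited: mark, step to p[j], recurse
      have hvj' : V.getD j.toNat false = false := by simpa using hvj
      have hset : PySem.List.pySetD V j true = V.set j.toNat true :=
        PySem.List.pySetD_of_nonneg V true hj0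
      have hpj : PySem.List.pyGetD p j 0 = p.getD j.toNat 0 :=
        pyGetD_int_toNat p j 0 hj0 (by omega)
      set j1 := p.getD j.toNat 0 with hj1
      set V1 := V.set j.toNat true with hV1
      have hres : F33innerA p (fuel+1) V j c = F33innerA p fuel V1 j1 (c+1) := by
        simp only [F33innerA, hget, hvj', hset, hpj]
        rfl
      have hj10 : 0 ≤ j1 := (hmem j.toNat hkj).1
      have hj1n : j1 < (n : Int) := (hmem j.toNat hkj).2
      have hV1len : V1.length = n := by simp [hV1, hVlen]
      have hkjV : j.toNat < V.length := by omega
      have hmono1 : ∀ k, V.getD k false = true → V1.getD k false = true := by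
        intro k hk
        rw [hV1, getD_set_bool V j.toNat k hkjV]
        split_ifs
        · rfl
        · exact hk
      have hV1j : V1.getD j.toNat false = true := by
        rw [hV1, getD_set_bool V j.toNat j.toNat hkjV]; simp
      have hpjj : j1 ≠ j := by
        rcases hE with h | h
        · exact h
        · exact absurd h hvj
      have hcount : V1.count true = V.count true + 1 :=
        count_set_true V j.toNat hkjV hvj'
      have hcltn : V.count true < n := hVlen ▸ count_true_lt V j.toNat hkjV hvj'
      have hNF1 : ∀ k, k < n → V1.getD k false = true → p.getD k 0 ≠ (k : Int) := by
        intro k hk hVk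
        rcases eq_or_ne k j.toNat with rfl | hne
        · rw [hcast]; exact hpjj
        · apply hNF k hk
          rw [hV1, getD_set_bool V j.toNat k hkjV, if_neg hne] at hVk
          exact hVk
      have hClos1 : ∀ k, k < n → V1.getD k false = true →
          (V1.getD (p.getD k 0).toNat false = true ∨ p.getD k 0 = j1) := by
        intro k hk hVk
        rcases eq_or_ne k j.toNat with rfl | hne
        · right; rfl
        · rw [hV1, getD_set_bool V j.toNat k hkjV, if_neg hne] at hVk
          rcases hClos k hk hVk with h | h
          · exact Or.inl (hmono1 _ h)
          · left
            rw [h, ← hcast, Int.toNat_natCast]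
            exact hV1j
      have hE1 : p.getD j1.toNat 0 ≠ j1 ∨ V1.getD j1.toNat false = true := by
        by_cases hx : p.getD j1.toNat 0 = j1
        · right
          have hj1nat : j1.toNat < n := by omega
          have heq : j1.toNat = j.toNat := by
            apply hinj _ _ hj1nat hkj
            rw [hx, ← hj1]
          rw [heq]; exact hV1j
        · exact Or.inl hx
      have := ih V1 j1 (c+1) hV1len hj10 hj1n
        (by rw [hcount]; push_cast; omega) hNF1 hClos1 hE1
        (by rw [hcount]; omega)
      rw [hres]
      obtain ⟨r1, r2, r3, r4, r5, r6⟩ := this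
      refine ⟨r1, r2, ?_, ?_, r5, r6⟩
      · intro k hk hVk
        exact r3 k hk (hmono1 k hVk)
      · exact r3 j.toNat hkj hV1j

-- the outer for-loop over range(n): after m iterations the visited entries are exactly the
-- non-fixed indices among the cycles touched so far, and the counter counts them
theorem outer_spec (n : Nat) (p : List Int)
    (hlen : p.length = n)
    (hmem : ∀ k, k < n → 0 ≤ p.getD k 0 ∧ p.getD k 0 < (n : Int))
    (hinj : ∀ a b, a < n → b < n → p.getD a 0 = p.getD b 0 → a = b) :
    ∀ (m : Nat), m ≤ n →
    (F33loop n p m).1.length = n ∧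
    (F33loop n p m).2 = ((F33loop n p m).1.count true : Int) ∧
    (∀ k, k < n → (F33loop n p m).1.getD k false = true → p.getD k 0 ≠ (k : Int)) ∧
    (∀ k, k < n → (F33loop n p m).1.getD k false = true →
        (F33loop n p m).1.getD (p.getD k 0).toNat false = true) ∧
    (∀ k, k < m → p.getD k 0 ≠ (k : Int) → (F33loop n p m).1.getD k false = true) := by
  intro m
  induction m with
  | zero =>
    intro _
    refine ⟨by simp [F33loop], by simp [F33loop, List.count_replicate], ?_, ?_, by omega⟩
    · intro k hk hVk
      rw [show (F33loop n p 0).1 = List.replicate n false from rfl,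
        List.getD_replicate false hk] at hVk
      exact absurd hVk (by simp)
    · intro k hk hVk
      rw [show (F33loop n p 0).1 = List.replicate n false from rfl,
        List.getD_replicate false hk] at hVk
      exact absurd hVk (by simp)
  | succ m ih =>
    intro hm1
    have hm : m ≤ n := by omega
    have hmn : m < n := by omega
    obtain ⟨i1, i2, i3, i4, i5⟩ := ih hm
    have hstep : F33loop n p (m+1) =
        (if PySem.List.pyGetD (F33loop n p m).1 (m : Int) false ||
            decide (PySem.List.pyGetD p (m : Int) 0 = (m : Int)) then (F33loop n p m)
         else F33innerA p (n + 1) (F33loop n p m).1 (m : Int) (F33loop n p m).2) := by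
      rw [F33loop, List.range_succ, List.foldl_append]
      rfl
    have hgV : PySem.List.pyGetD (F33loop n p m).1 (m : Int) false =
        (F33loop n p m).1.getD m false := by
      rw [pyGetD_int_toNat _ _ _ (by omega) (by rw [i1]; exact_mod_cast hmn), Int.toNat_natCast]
    have hgp : PySem.List.pyGetD p (m : Int) 0 = p.getD m 0 := by
      rw [pyGetD_int_toNat _ _ _ (by omega) (by rw [hlen]; exact_mod_cast hmn), Int.toNat_natCast]
    by_cases hcond : (F33loop n p m).1.getD m false = true ∨ p.getD m 0 = (m : Int)
    · have hcondB : ((F33loop n p m).1.getD m false ||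
          decide (p.getD m 0 = (m : Int))) = true := by
        rcases hcond with h | h
        · rw [h]; simp
        · rw [h]; simp
      have hskip : F33loop n p (m+1) = F33loop n p m := by
        rw [hstep, hgV, hgp, if_pos hcondB]
      rw [hskip]
      refine ⟨i1, i2, i3, i4, ?_⟩
      intro k hk hpk
      rcases Nat.lt_or_ge k m with h | h
      · exact i5 k h hpk
      · have hkm : k = m := by omega
        subst hkm
        rcases hcond with h | h
        · exact h
        · exact absurd h hpk
    · rw [not_or] at hcond
      obtain ⟨hnv, hnf⟩ := hcond
      have hnv' : (F33loop n p m).1.getD m false = false := by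
        cases h : (F33loop n p m).1.getD m false
        · rfl
        · exact absurd h hnv
      have hgo : F33loop n p (m+1) =
          F33innerA p (n + 1) (F33loop n p m).1 (m : Int) (F33loop n p m).2 := by
        have hcondB : ((F33loop n p m).1.getD m false ||
            decide (p.getD m 0 = (m : Int))) = false := by
          rw [hnv', Bool.false_or]
          exact decide_eq_false hnf
        rw [hstep, hgV, hgp, hcondB]
        simp
      have hcnt : (F33loop n p m).1.count true < n := by
        have := count_true_lt (F33loop n p m).1 m (by omega) hnv'
        omega
      have := innerA_spec n p hlen hmem hinj (n+1) (F33loop n p m).1 (m : Int)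
        (F33loop n p m).2 i1 (by omega) (by exact_mod_cast hmn) i2 i3
        (fun k hk hVk => Or.inl (i4 k hk hVk))
        (by rw [Int.toNat_natCast]; exact Or.inl hnf)
        (by omega)
      rw [hgo]
      obtain ⟨r1, r2, r3, r4, r5, r6⟩ := this
      refine ⟨r1, r2, r5, r6, ?_⟩
      intro k hk hpk
      rcases Nat.lt_or_ge k m with h | h
      · exact r3 k (by omega) (i5 k h hpk)
      · have hkm : k = m := by omega
        subst hkm
        rwa [Int.toNat_natCast] at r4

-- the shared permutation both ports sort-build
def sortedIdx (cs : List Char) : List Int :=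
  PySem.List.sorted (PySem.List.pyRange 0 (cs.length : Int) 1) (fun k => PySem.List.pyGetD cs k ' ') false

theorem sortedIdx_facts (cs : List Char) :
    (sortedIdx cs).length = cs.length ∧
    (∀ k, k < cs.length → 0 ≤ (sortedIdx cs).getD k 0 ∧ (sortedIdx cs).getD k 0 < (cs.length : Int)) ∧
    (∀ a b, a < cs.length → b < cs.length → (sortedIdx cs).getD a 0 = (sortedIdx cs).getD b 0 → a = b) := by
  have hperm : (sortedIdx cs).Perm (PySem.List.pyRange 0 (cs.length : Int) 1) :=
    PySem.List.sorted_perm _ _ _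
  have hlen : (sortedIdx cs).length = cs.length := by
    rw [hperm.length_eq, PySem.List.length_pyRange_one]
    simp
  have hnd : (sortedIdx cs).Nodup :=
    hperm.nodup_iff.mpr (PySem.List.nodup_pyRange_one 0 (cs.length : Int))
  have hmem : ∀ k, k < cs.length →
      0 ≤ (sortedIdx cs).getD k 0 ∧ (sortedIdx cs).getD k 0 < (cs.length : Int) := by
    intro k hk
    have hk' : k < (sortedIdx cs).length := by omega
    rw [List.getD_eq_getElem _ _ hk']
    have : (sortedIdx cs)[k] ∈ PySem.List.pyRange 0 (cs.length : Int) 1 :=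
      hperm.mem_iff.mp (List.getElem_mem hk')
    exact PySem.List.mem_pyRange_one.mp this
  refine ⟨hlen, hmem, ?_⟩
  intro a b ha hb h
  have ha' : a < (sortedIdx cs).length := by omega
  have hb' : b < (sortedIdx cs).length := by omega
  rw [List.getD_eq_getElem _ _ ha', List.getD_eq_getElem _ _ hb'] at h
  exact (List.Nodup.getElem_inj_iff hnd).mp h

theorem A_loop_count (n : Nat) (p : List Int)
    (hlen : p.length = n)
    (hmem : ∀ k, k < n → 0 ≤ p.getD k 0 ∧ p.getD k 0 < (n : Int))
    (hinj : ∀ a b, a < n → b < n → p.getD a 0 = p.getD b 0 → a = b) :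
    (F33loop n p n).2 = (((List.range n).countP (fun k => decide (p.getD k 0 ≠ (k : Int)))) : Int) := by
  obtain ⟨i1, i2, i3, i4, i5⟩ := outer_spec n p hlen hmem hinj n le_rfl
  rw [i2]
  congr 1
  rw [← count_true_eq_countP_range (F33loop n p n).1, i1]
  apply List.countP_congr
  intro k hk
  rw [List.mem_range] at hk
  by_cases h : p.getD k 0 = (k : Int)
  · have hf : (F33loop n p n).1.getD k false = false := by
      cases hh : (F33loop n p n).1.getD k false
      · rfl
      · exact absurd h (i3 k hk hh)
    rw [hf, h]; simp
  · rw [i5 k hk h]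
    rw [List.getD_eq_getElem?_getD] at h
    simp [h]

theorem F33_eq_count (seq : String) :
    F33 seq = (((List.range seq.toList.length).countP
      (fun k => decide ((sortedIdx seq.toList).getD k 0 ≠ (k : Int)))) : Int) := by
  obtain ⟨hlen, hmem, hinj⟩ := sortedIdx_facts seq.toList
  have h0 : F33 seq = (F33loop seq.toList.length (sortedIdx seq.toList) seq.toList.length).2 := by
    show ((PySem.List.pyRange 0 (seq.toList.length : Int) 1).foldl
      (fun (st : List Bool × Int) i =>
        if PySem.List.pyGetD st.1 i false ||
            decide (PySem.List.pyGetD (sortedIdx seq.toList) i 0 = i) then st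
        else F33innerA (sortedIdx seq.toList) (seq.toList.length + 1) st.1 i st.2)
      (List.replicate seq.toList.length false, 0)).2 = _
    rw [PySem.List.pyRange_zero_nat, List.foldl_map]
    rfl
  rw [h0]
  exact A_loop_count seq.toList.length (sortedIdx seq.toList) hlen hmem hinj

theorem F33_alt_eq_count (seq : String) :
    F33_alt seq = (((List.range seq.toList.length).countP
      (fun k => decide ((sortedIdx seq.toList).getD k 0 ≠ (k : Int)))) : Int) := by
  obtain ⟨hlen, _, _⟩ := sortedIdx_facts seq.toList
  have h0 : F33_alt seq = (PySem.List.enumerate (sortedIdx seq.toList) 0).foldl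
      (fun acc pr => if pr.2 ≠ pr.1 then acc + 1 else acc) 0 := rfl
  rw [h0, PySem.List.foldl_ite_add_one (fun pr : Int × Int => pr.2 ≠ pr.1)]
  rw [PySem.List.enumerate_eq_map_pyRange (sortedIdx seq.toList) 0, List.countP_map]
  rw [show PySem.List.len (sortedIdx seq.toList) = (seq.toList.length : Int) by
    rw [PySem.List.len_eq, hlen]]
  rw [PySem.List.pyRange_zero_nat, List.countP_map]
  simp only [Function.comp_def, PySem.List.pyGetD_natCast]
  simp

-- ===== VERDICT (by name: the statement is the Claim_ definition above) =====
theorem F33_spec : Claim_equal_F33 := by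
  intro seq _
  unfold Spec_F33
  rw [F33_eq_count, F33_alt_eq_count]
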